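-- pv_equiv track=rewrite | github.com/lucasli233/compsci-373 | quiz11.py | computeMedian5x3ZeroPadding
-- ===== SOURCE A (Python) =====
-- def createInitializedGreyscalePixelArray(image_width, image_height):
--   return [[0]*image_width for _ in range(image_height)]
--
-- def computeMedian5x3ZeroPadding(pixel_array, image_width, image_height):
--   box_median = createInitializedGreyscalePixelArray(image_width, image_height)
--
--   padded_pixel_array = createInitializedGreyscalePixelArray(image_width+4, image_height+2)
--   for i in range(0, image_height):
--     for j in range(0, image_width):
--       padded_pixel_array[i+1][j+2] = pixel_array[i][j]
--
--   for i in range(0, image_height):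
--     for j in range(0, image_width):
--       boxlist = sorted([padded_pixel_array[i+1-1][j+2-2], padded_pixel_array[i+1-1][j+2-1], padded_pixel_array[i+1-1][j+2], padded_pixel_array[i+1-1][j+2+1], padded_pixel_array[i+1-1][j+2+2],
--       padded_pixel_array[i+1][j+2-2], padded_pixel_array[i+1][j+2-1], padded_pixel_array[i+1][j+2], padded_pixel_array[i+1][j+2+1], padded_pixel_array[i+1][j+2+2],
--       padded_pixel_array[i+1+1][j+2-2], padded_pixel_array[i+1+1][j+2-1], padded_pixel_array[i+1+1][j+2], padded_pixel_array[i+1+1][j+2+1], padded_pixel_array[i+1+1][j+2+2]])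
--       box_median[i][j] = boxlist[7]
--
--   return box_median
-- ===== SOURCE B (Python) =====
-- def computeMedian5x3ZeroPadding(pixel_array, image_width, image_height):
--     result = []
--     for i in range(image_height):
--         row = []
--         for j in range(image_width):
--             win = []
--             for dy in (-1, 0, 1):
--                 for dx in (-2, -1, 0, 1, 2):
--                     y, x = i + dy, j + dx
--                     win.append(pixel_array[y][x]
--                                if 0 <= y < image_height and 0 <= x < image_width
--                                else 0)
--             # median by counting selection, no sort: the 8th order statistic of the
--             # 15-element window is the smallest value v in it with at least 8
--             # window elements <= v (candidates is never empty: max(win) qualifies)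
--             candidates = [v for v in win if sum(1 for w in win if w <= v) >= 8]
--             row.append(min(candidates))
--         result.append(row)
--     return result
-- ===== Notes on version B (the rewrite author's own statement) =====
-- stated objective: alternative
-- what changed: B drops A's zero-padded scratch array (gathers each 5x3 window with inline bounds checks) and replaces the per-window sort entirely: the median is computed by counting-based selection, as the smallest window value with at least 8 window elements <= it.
import Mathlib
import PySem

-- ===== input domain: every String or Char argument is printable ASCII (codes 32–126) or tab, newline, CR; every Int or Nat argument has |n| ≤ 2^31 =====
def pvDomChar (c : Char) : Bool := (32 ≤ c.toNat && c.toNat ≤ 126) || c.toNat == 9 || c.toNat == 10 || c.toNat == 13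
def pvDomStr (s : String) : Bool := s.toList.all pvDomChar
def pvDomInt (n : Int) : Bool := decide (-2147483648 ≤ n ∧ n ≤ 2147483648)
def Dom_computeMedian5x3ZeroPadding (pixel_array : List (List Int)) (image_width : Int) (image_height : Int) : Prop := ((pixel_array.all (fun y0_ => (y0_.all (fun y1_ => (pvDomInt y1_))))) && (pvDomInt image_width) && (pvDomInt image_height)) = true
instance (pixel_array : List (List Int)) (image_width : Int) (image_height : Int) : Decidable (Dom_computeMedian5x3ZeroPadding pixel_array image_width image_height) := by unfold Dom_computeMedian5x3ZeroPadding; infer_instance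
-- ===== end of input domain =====

-- B drops A's zero-padded scratch array (it gathers each 5x3 window with inline bounds checks)
-- and replaces the per-window sort by counting-based selection: the median is the smallest
-- window value with at least 8 window elements ≤ it; same return value.

-- ===== PORT A =====
-- [[0]*image_width for _ in range(image_height)]; [0]*w = List.replicate w.toNat 0 (empty for w <= 0, as in Python)
def createInitializedGreyscalePixelArray (image_width : Int) (image_height : Int) : List (List Int) :=
  (PySem.List.pyRange 0 image_height).map (fun _ => List.replicate image_width.toNat 0)

-- m[r][c] (read): exact Python indexing whenever 0 <= r < len m and 0 <= c < len (m[r]) —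
-- the only indices the loops of A produce on inputs admitted by Pre_.
def pvGet2 (m : List (List Int)) (r c : Int) : Int :=
  PySem.List.pyGetD (PySem.List.pyGetD m r []) c 0

-- m[r][c] = v (write): exact for the in-range nonnegative indices the loops of A produce.
def pvSet2 (m : List (List Int)) (r c : Int) (v : Int) : List (List Int) :=
  m.set r.toNat ((m.getD r.toNat []).set c.toNat v)

-- the first double loop of A: copy pixel_array into the middle of the padded array
def pvPadded (pixel_array : List (List Int)) (image_width : Int) (image_height : Int) : List (List Int) :=
  (PySem.List.pyRange 0 image_height).foldl (fun acc i =>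
    (PySem.List.pyRange 0 image_width).foldl (fun acc2 j =>
      pvSet2 acc2 (i + 1) (j + 2) (pvGet2 pixel_array i j)) acc)
    (createInitializedGreyscalePixelArray (image_width + 4) (image_height + 2))

-- the body of A's second double loop: boxlist = sorted([...15 reads...]); cell = boxlist[7]
def pvMedA (padded : List (List Int)) (i j : Int) : Int :=
  let boxlist := PySem.List.sorted
    [pvGet2 padded (i+1-1) (j+2-2), pvGet2 padded (i+1-1) (j+2-1), pvGet2 padded (i+1-1) (j+2), pvGet2 padded (i+1-1) (j+2+1), pvGet2 padded (i+1-1) (j+2+2),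
     pvGet2 padded (i+1) (j+2-2), pvGet2 padded (i+1) (j+2-1), pvGet2 padded (i+1) (j+2), pvGet2 padded (i+1) (j+2+1), pvGet2 padded (i+1) (j+2+2),
     pvGet2 padded (i+1+1) (j+2-2), pvGet2 padded (i+1+1) (j+2-1), pvGet2 padded (i+1+1) (j+2), pvGet2 padded (i+1+1) (j+2+1), pvGet2 padded (i+1+1) (j+2+2)]
    (fun v => v)
  PySem.List.pyGetD boxlist 7 0

def computeMedian5x3ZeroPadding (pixel_array : List (List Int)) (image_width : Int) (image_height : Int) : List (List Int) :=
  let padded := pvPadded pixel_array image_width image_height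
  (PySem.List.pyRange 0 image_height).foldl (fun acc i =>
    (PySem.List.pyRange 0 image_width).foldl (fun acc2 j =>
      pvSet2 acc2 i j (pvMedA padded i j)) acc)
    (createInitializedGreyscalePixelArray image_width image_height)

-- ===== PORT B =====
-- window element: pixel_array[y][x] when (y,x) is inside the image, else the zero padding
def pvWindowVal (pixel_array : List (List Int)) (image_width : Int) (image_height : Int) (y x : Int) : Int :=
  if 0 ≤ y ∧ y < image_height ∧ 0 ≤ x ∧ x < image_width then
    PySem.List.pyGetD (PySem.List.pyGetD pixel_array y []) x 0
  else 0

-- B's per-pixel body: gather the window with bounds checks, then counting selection (no sort):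
-- candidates = values with >= 8 window elements <= them; the median is min(candidates).
-- min(candidates) is ported as (min? …).getD 0: candidates is never empty for the 15-element
-- window built here (its maximum always qualifies), so the default is never used.
def pvMedB (pixel_array : List (List Int)) (image_width : Int) (image_height : Int) (i j : Int) : Int :=
  let win := ([-1, 0, 1] : List Int).foldl (fun win dy =>
    ([-2, -1, 0, 1, 2] : List Int).foldl (fun win2 dx =>
      win2 ++ [pvWindowVal pixel_array image_width image_height (i + dy) (j + dx)]) win) []
  let candidates := win.filter (fun v => decide (8 ≤ win.countP (fun w => decide (w ≤ v))))
  (PySem.List.min? candidates (fun x => x)).getD 0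

def computeMedian5x3ZeroPadding_alt (pixel_array : List (List Int)) (image_width : Int) (image_height : Int) : List (List Int) :=
  (PySem.List.pyRange 0 image_height).foldl (fun result i =>
    result ++ [(PySem.List.pyRange 0 image_width).foldl (fun row j =>
      row ++ [pvMedB pixel_array image_width image_height i j]) []]) []

-- ===== PRECONDITION & SPEC =====
-- Pre_ excludes exactly the inputs where Python A raises IndexError: when both dimensions are
-- positive, pixel_array must have at least image_height rows and each of those rows at least
-- image_width entries.  (B raises on exactly the same inputs.)
def Pre_computeMedian5x3ZeroPadding (pixel_array : List (List Int)) (image_width : Int) (image_height : Int) : Prop :=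
  0 < image_height → 0 < image_width →
    (image_height ≤ (pixel_array.length : Int) ∧
     ∀ row ∈ pixel_array.take image_height.toNat, image_width ≤ (row.length : Int))
instance (pixel_array : List (List Int)) (image_width : Int) (image_height : Int) : Decidable (Pre_computeMedian5x3ZeroPadding pixel_array image_width image_height) := by unfold Pre_computeMedian5x3ZeroPadding; infer_instance

def pvWitness_computeMedian5x3ZeroPadding : List (List Int) × Int × Int := ([[1, 2], [3, 4]], 2, 2)

def Spec_computeMedian5x3ZeroPadding (pixel_array : List (List Int)) (image_width : Int) (image_height : Int) (out : List (List Int)) : Prop := out = computeMedian5x3ZeroPadding_alt pixel_array image_width image_height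
instance (pixel_array : List (List Int)) (image_width : Int) (image_height : Int) (out : List (List Int)) : Decidable (Spec_computeMedian5x3ZeroPadding pixel_array image_width image_height out) := by unfold Spec_computeMedian5x3ZeroPadding; infer_instance

-- ===== CLAIM (what is proved, stated in full; the proofs are below) =====
def Claim_equal_computeMedian5x3ZeroPadding : Prop := ∀ (pixel_array : List (List Int)) (image_width : Int) (image_height : Int), Dom_computeMedian5x3ZeroPadding pixel_array image_width image_height → Pre_computeMedian5x3ZeroPadding pixel_array image_width image_height → Spec_computeMedian5x3ZeroPadding pixel_array image_width image_height (computeMedian5x3ZeroPadding pixel_array image_width image_height)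

-- ===== LEMMAS AND PROOFS =====

-- Counting selection names the order statistic: on a 15-element list, the smallest value with
-- at least 8 elements ≤ it is sorted(l)[7].
lemma select_eq (l : List Int) (hl : l.length = 15) :
    (PySem.List.min? (l.filter (fun v => decide (8 ≤ l.countP (fun w => decide (w ≤ v))))) (fun x => x)).getD 0
    = PySem.List.pyGetD (PySem.List.sorted l (fun v => v)) 7 0 := by
  set s := PySem.List.sorted l (fun v => v) with hs
  have hperm : s.Perm l := PySem.List.sorted_perm l (fun v => v) false
  have hslen : s.length = 15 := by rw [hperm.length_eq, hl]
  have h7 : (7 : Nat) < s.length := by omega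
  set m := s[7] with hm
  have hcount : ∀ v, l.countP (fun w => decide (w ≤ v)) = s.countP (fun w => decide (w ≤ v)) :=
    fun v => (hperm.countP_eq _).symm
  -- m itself qualifies: the first 8 entries of s are ≤ m
  have hmq : 8 ≤ l.countP (fun w => decide (w ≤ m)) := by
    rw [hcount]
    have hsplit : s = s.take 8 ++ s.drop 8 := (List.take_append_drop 8 s).symm
    rw [hsplit, List.countP_append]
    have hall : ∀ a ∈ s.take 8, (fun w => decide (w ≤ m)) a = true := by
      intro a ha
      obtain ⟨i, hi, rfl⟩ := List.getElem_of_mem ha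
      rw [List.length_take, hslen] at hi
      rw [List.getElem_take]
      simp only [decide_eq_true_eq]
      exact PySem.List.sorted_id_getElem_mono l (by omega) h7
    rw [List.countP_eq_length.mpr hall, List.length_take, hslen]
    omega
  -- every qualifying value is ≥ m
  have hmin : ∀ v ∈ l, 8 ≤ l.countP (fun w => decide (w ≤ v)) → m ≤ v := by
    intro v _ hv
    by_contra hlt
    rw [not_le] at hlt
    rw [hcount] at hv
    have hsplit : s = s.take 7 ++ s.drop 7 := (List.take_append_drop 7 s).symm
    rw [hsplit, List.countP_append] at hv
    have hdrop : (s.drop 7).countP (fun w => decide (w ≤ v)) = 0 := by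
      rw [List.countP_eq_zero]
      intro a ha
      obtain ⟨i, hi, rfl⟩ := List.getElem_of_mem ha
      rw [List.length_drop, hslen] at hi
      have hi' : 7 + i < s.length := by omega
      rw [List.getElem_drop]
      simp only [decide_eq_true_eq, not_le]
      calc v < m := hlt
        _ ≤ s[7 + i]'hi' := PySem.List.sorted_id_getElem_mono l (by omega) hi'
    have htake : (s.take 7).countP (fun w => decide (w ≤ v)) ≤ 7 := by
      calc (s.take 7).countP _ ≤ (s.take 7).length := List.countP_le_length
        _ ≤ 7 := by rw [List.length_take]; omega
    omega
  -- min? of the candidates is exactly m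
  have hmcand : m ∈ l.filter (fun v => decide (8 ≤ l.countP (fun w => decide (w ≤ v)))) := by
    rw [List.mem_filter]
    exact ⟨hperm.mem_iff.mp (List.getElem_mem h7), by simpa using hmq⟩
  have hne : l.filter (fun v => decide (8 ≤ l.countP (fun w => decide (w ≤ v)))) ≠ [] :=
    List.ne_nil_of_mem hmcand
  obtain ⟨m', hm'⟩ : ∃ m', PySem.List.min? (l.filter (fun v => decide (8 ≤ l.countP (fun w => decide (w ≤ v))))) (fun x => x) = some m' := by
    cases hmin? : PySem.List.min? (l.filter (fun v => decide (8 ≤ l.countP (fun w => decide (w ≤ v))))) (fun x => x) with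
    | none => exact absurd ((PySem.List.min?_eq_none_iff _ _).mp hmin?) hne
    | some m' => exact ⟨m', rfl⟩
  have hm'mem := PySem.List.min?_mem hm'
  rw [List.mem_filter] at hm'mem
  have h1 : m' ≤ m := PySem.List.min?_isMin hm' m hmcand
  have h2 : m ≤ m' := hmin m' hm'mem.1 (by simpa using hm'mem.2)
  rw [hm', Option.getD_some,
    PySem.List.pyGetD_eq_getElem _ _ (by norm_num) (by omega)]
  have h7' : (7:Int).toNat = 7 := rfl
  simp only [h7']
  omega

-- Nat-level image of the in-place writes of A
def nset2 (m : List (List Int)) (r c : Nat) (v : Int) : List (List Int) :=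
  m.set r ((m.getD r []).set c v)

-- writing f 0, …, f (m-1) at offset c0 into a row of W zeros
lemma rowfill (c0 : Nat) (f : Nat → Int) (m W : Nat) (h : c0 + m ≤ W) :
    (List.range m).foldl (fun row j => row.set (c0 + j) (f j)) ((List.range W).map (fun _ => (0:Int)))
    = (List.range W).map (fun c => if c0 ≤ c ∧ c < c0 + m then f (c - c0) else 0) := by
  induction m with
  | zero =>
    simp only [List.range_zero, List.foldl_nil]
    apply List.map_congr_left
    intro c _
    rw [if_neg (by omega)]
  | succ m ih =>
    rw [List.range_succ, List.foldl_append, ih (by omega), List.foldl_cons, List.foldl_nil]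
    apply List.ext_getElem (by simp)
    intro c h1 h2
    simp only [List.getElem_set, List.getElem_map, List.getElem_range]
    by_cases hc : c0 + m = c
    · rw [if_pos hc, if_pos (by omega)]
      congr 1
      omega
    · rw [if_neg hc]
      by_cases hin : c0 ≤ c ∧ c < c0 + m
      · rw [if_pos hin, if_pos (by omega)]
      · rw [if_neg hin, if_neg (by omega)]

-- an inner loop that only writes row R factors into a single List.set of that row
lemma inner_fix (R c0 : Nat) (f : Nat → Int) (m : Nat) (acc : List (List Int)) :
    (List.range m).foldl (fun a2 j => nset2 a2 R (c0 + j) (f j)) acc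
    = acc.set R ((List.range m).foldl (fun row j => row.set (c0 + j) (f j)) (acc.getD R [])) := by
  by_cases hR : R < acc.length
  · induction m with
    | zero =>
      simp only [List.range_zero, List.foldl_nil]
      rw [List.getD_eq_getElem acc [] hR, List.set_getElem_self]
    | succ m ih =>
      rw [List.range_succ, List.foldl_append, List.foldl_append, ih, List.foldl_cons,
        List.foldl_nil, List.foldl_cons, List.foldl_nil]
      unfold nset2
      rw [List.set_set]
      congr 1
      rw [List.getD_eq_getElem _ [] (by simpa using hR), List.getElem_set_self]
  · rw [not_lt] at hR
    have hset : ∀ x, acc.set R x = acc := fun x => List.set_eq_of_length_le hR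
    rw [hset]
    induction m with
    | zero => simp
    | succ m ih =>
      rw [List.range_succ, List.foldl_append, ih, List.foldl_cons, List.foldl_nil]
      unfold nset2
      exact List.set_eq_of_length_le hR

-- characterisation of A's write loops: n×m writes at offset (r0,c0) into an H×W zero array
lemma fill2 (r0 c0 : Nat) (g : Nat → Nat → Int) (m W H : Nat) (hc : c0 + m ≤ W)
    (n : Nat) (hr : r0 + n ≤ H) :
    (List.range n).foldl (fun acc i => (List.range m).foldl (fun a2 j => nset2 a2 (r0 + i) (c0 + j) (g i j)) acc)
        ((List.range H).map (fun _ => (List.range W).map (fun _ => (0:Int))))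
    = (List.range H).map (fun r => (List.range W).map (fun c =>
        if r0 ≤ r ∧ r < r0 + n ∧ c0 ≤ c ∧ c < c0 + m then g (r - r0) (c - c0) else 0)) := by
  induction n with
  | zero =>
    simp only [List.range_zero, List.foldl_nil]
    apply List.map_congr_left
    intro r _
    apply List.map_congr_left
    intro c _
    rw [if_neg (by omega)]
  | succ n ih =>
    rw [List.range_succ, List.foldl_append, ih (by omega), List.foldl_cons, List.foldl_nil]
    rw [inner_fix]
    have hlt : r0 + n < H := by omega
    -- the row about to be written is still all zeros
    have hrow : (((List.range H).map (fun r => (List.range W).map (fun c =>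
        if r0 ≤ r ∧ r < r0 + n ∧ c0 ≤ c ∧ c < c0 + m then g (r - r0) (c - c0) else 0))).getD (r0 + n) [])
        = (List.range W).map (fun _ => (0:Int)) := by
      rw [List.getD_eq_getElem _ [] (by simpa using hlt)]
      simp only [List.getElem_map, List.getElem_range]
      apply List.map_congr_left
      intro c _
      rw [if_neg (by omega)]
    rw [hrow, rowfill c0 (fun j => g n j) m W hc]
    apply List.ext_getElem (by simp)
    intro r h1 h2
    simp only [List.getElem_set, List.getElem_map, List.getElem_range]
    by_cases hrn : r0 + n = r
    · rw [if_pos hrn]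
      apply List.map_congr_left
      intro c _
      by_cases hcin : c0 ≤ c ∧ c < c0 + m
      · rw [if_pos hcin, if_pos (by omega)]
        congr 1
        omega
      · rw [if_neg hcin, if_neg (by omega)]
    · rw [if_neg hrn]
      apply List.map_congr_left
      intro c _
      by_cases hin : r0 ≤ r ∧ r < r0 + n ∧ c0 ≤ c ∧ c < c0 + m
      · rw [if_pos hin, if_pos (by omega)]
      · rw [if_neg hin, if_neg (by omega)]

-- reading the characterised padded array is B's bounds-checked window read
lemma readA (pa : List (List Int)) (hn wn : Nat) (R C : Int)
    (hR : 0 ≤ R ∧ R < (hn : Int) + 2) (hC : 0 ≤ C ∧ C < (wn : Int) + 4) :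
    pvGet2 ((List.range (hn + 2)).map (fun r => (List.range (wn + 4)).map (fun c =>
        if 1 ≤ r ∧ r < 1 + hn ∧ 2 ≤ c ∧ c < 2 + wn then pvGet2 pa ((r - 1 : Nat) : Int) ((c - 2 : Nat) : Int) else 0))) R C
    = pvWindowVal pa (wn : Int) (hn : Int) (R - 1) (C - 2) := by
  unfold pvGet2 pvWindowVal
  rw [PySem.List.pyGetD_eq_getElem _ _ hR.1 (by simpa using (by omega : R < ((hn + 2 : Nat) : Int)))]
  simp only [List.getElem_map, List.getElem_range]
  rw [PySem.List.pyGetD_eq_getElem _ _ hC.1 (by simpa using (by omega : C < ((wn + 4 : Nat) : Int)))]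
  simp only [List.getElem_map, List.getElem_range]
  by_cases h : 1 ≤ R.toNat ∧ R.toNat < 1 + hn ∧ 2 ≤ C.toNat ∧ C.toNat < 2 + wn
  · rw [if_pos h, if_pos (by omega)]
    have e1 : ((R.toNat - 1 : Nat) : Int) = R - 1 := by omega
    have e2 : ((C.toNat - 2 : Nat) : Int) = C - 2 := by omega
    rw [e1, e2]
  · rw [if_neg h, if_neg (by omega)]

-- the padded array A builds, characterised pointwise
lemma hpad (pa : List (List Int)) (hn wn : Nat) :
    pvPadded pa (wn : Int) (hn : Int)
    = (List.range (hn + 2)).map (fun r => (List.range (wn + 4)).map (fun c =>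
        if 1 ≤ r ∧ r < 1 + hn ∧ 2 ≤ c ∧ c < 2 + wn then pvGet2 pa ((r - 1 : Nat) : Int) ((c - 2 : Nat) : Int) else 0)) := by
  unfold pvPadded createInitializedGreyscalePixelArray
  have e2 : ((hn : Int) + 2) = ((hn + 2 : Nat) : Int) := by push_cast; ring
  have e4 : ((wn : Int) + 4) = ((wn + 4 : Nat) : Int) := by push_cast; ring
  rw [e2, e4]
  simp only [PySem.List.pyRange_zero_natCast, List.foldl_map, List.map_map]
  rw [show (List.map ((fun _ => List.replicate ((wn + 4 : Nat) : Int).toNat (0:Int)) ∘ fun (k : Nat) => (k : Int)) (List.range (hn + 2)))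
      = (List.range (hn + 2)).map (fun _ => (List.range (wn + 4)).map (fun _ => (0:Int))) from by
    apply List.map_congr_left; intro r _
    simp [Function.comp, List.map_const']
    omega]
  rw [show (fun (x : List (List Int)) (y : Nat) =>
        List.foldl (fun (x2 : List (List Int)) (y1 : Nat) => pvSet2 x2 ((y:Int) + 1) ((y1:Int) + 2) (pvGet2 pa (y:Int) (y1:Int))) x (List.range wn))
      = (fun (acc : List (List Int)) (i : Nat) =>
        List.foldl (fun (a2 : List (List Int)) (j : Nat) => nset2 a2 (1 + i) (2 + j) ((fun (a b : Nat) => pvGet2 pa (a:Int) (b:Int)) i j)) acc (List.range wn)) from by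
    funext acc k
    have hf : (fun (x2 : List (List Int)) (y1 : Nat) => pvSet2 x2 ((k:Int) + 1) ((y1:Int) + 2) (pvGet2 pa (k:Int) (y1:Int)))
        = (fun (a2 : List (List Int)) (j : Nat) => nset2 a2 (1 + k) (2 + j) ((fun (a b : Nat) => pvGet2 pa (a:Int) (b:Int)) k j)) := by
      funext a2 l
      have e1 : ((k:Int) + 1).toNat = 1 + k := by omega
      have e2' : ((l:Int) + 2).toNat = 2 + l := by omega
      simp [pvSet2, nset2, e1, e2']
    rw [hf]]
  exact fill2 1 2 (fun a b => pvGet2 pa (a:Int) (b:Int)) wn (wn + 4) (hn + 2) (by omega) hn (by omega)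

-- A's and B's per-pixel bodies agree once the padded array is characterised:
-- the 15 reads coincide, and select_eq turns B's counting selection into A's sorted[7]
lemma med_eq (pa : List (List Int)) (hn wn : Nat) (k l : Nat) (hk : k < hn) (hl : l < wn) :
    pvMedA ((List.range (hn + 2)).map (fun r => (List.range (wn + 4)).map (fun c =>
        if 1 ≤ r ∧ r < 1 + hn ∧ 2 ≤ c ∧ c < 2 + wn then pvGet2 pa ((r - 1 : Nat) : Int) ((c - 2 : Nat) : Int) else 0))) (k : Int) (l : Int)
    = pvMedB pa (wn : Int) (hn : Int) (k : Int) (l : Int) := by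
  unfold pvMedA pvMedB
  simp only [List.foldl_cons, List.foldl_nil, List.nil_append, List.append_assoc, List.cons_append]
  rw [readA pa hn wn ((k:Int)+1-1) ((l:Int)+2-2) ⟨by omega, by omega⟩ ⟨by omega, by omega⟩,
      readA pa hn wn ((k:Int)+1-1) ((l:Int)+2-1) ⟨by omega, by omega⟩ ⟨by omega, by omega⟩,
      readA pa hn wn ((k:Int)+1-1) ((l:Int)+2) ⟨by omega, by omega⟩ ⟨by omega, by omega⟩,
      readA pa hn wn ((k:Int)+1-1) ((l:Int)+2+1) ⟨by omega, by omega⟩ ⟨by omega, by omega⟩,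
      readA pa hn wn ((k:Int)+1-1) ((l:Int)+2+2) ⟨by omega, by omega⟩ ⟨by omega, by omega⟩,
      readA pa hn wn ((k:Int)+1) ((l:Int)+2-2) ⟨by omega, by omega⟩ ⟨by omega, by omega⟩,
      readA pa hn wn ((k:Int)+1) ((l:Int)+2-1) ⟨by omega, by omega⟩ ⟨by omega, by omega⟩,
      readA pa hn wn ((k:Int)+1) ((l:Int)+2) ⟨by omega, by omega⟩ ⟨by omega, by omega⟩,
      readA pa hn wn ((k:Int)+1) ((l:Int)+2+1) ⟨by omega, by omega⟩ ⟨by omega, by omega⟩,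
      readA pa hn wn ((k:Int)+1) ((l:Int)+2+2) ⟨by omega, by omega⟩ ⟨by omega, by omega⟩,
      readA pa hn wn ((k:Int)+1+1) ((l:Int)+2-2) ⟨by omega, by omega⟩ ⟨by omega, by omega⟩,
      readA pa hn wn ((k:Int)+1+1) ((l:Int)+2-1) ⟨by omega, by omega⟩ ⟨by omega, by omega⟩,
      readA pa hn wn ((k:Int)+1+1) ((l:Int)+2) ⟨by omega, by omega⟩ ⟨by omega, by omega⟩,
      readA pa hn wn ((k:Int)+1+1) ((l:Int)+2+1) ⟨by omega, by omega⟩ ⟨by omega, by omega⟩,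
      readA pa hn wn ((k:Int)+1+1) ((l:Int)+2+2) ⟨by omega, by omega⟩ ⟨by omega, by omega⟩]
  rw [← select_eq _ (by norm_num)]
  norm_num
  ring_nf

lemma hinit (wn hn : Nat) :
    createInitializedGreyscalePixelArray (wn : Int) (hn : Int)
    = (List.range hn).map (fun _ => (List.range wn).map (fun _ => (0:Int))) := by
  unfold createInitializedGreyscalePixelArray
  rw [PySem.List.pyRange_zero_natCast, List.map_map]
  apply List.map_congr_left
  intro r _
  simp [List.map_const']

-- A's second double loop (writes at offset (0,0)) builds exactly the row-by-row map
lemma stage2 (g : Int → Int → Int) (hn wn : Nat) :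
    List.foldl (fun (x : List (List Int)) (y : Nat) =>
      List.foldl (fun (x2 : List (List Int)) (y1 : Nat) => pvSet2 x2 (y:Int) (y1:Int) (g (y:Int) (y1:Int))) x (List.range wn))
      ((List.range hn).map (fun _ => (List.range wn).map (fun _ => (0:Int)))) (List.range hn)
    = (List.range hn).map (fun (k : Nat) => (List.range wn).map (fun (l : Nat) => g (k:Int) (l:Int))) := by
  rw [show (fun (x : List (List Int)) (y : Nat) =>
        List.foldl (fun (x2 : List (List Int)) (y1 : Nat) => pvSet2 x2 (y:Int) (y1:Int) (g (y:Int) (y1:Int))) x (List.range wn))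
      = (fun (acc : List (List Int)) (i : Nat) =>
        List.foldl (fun (a2 : List (List Int)) (j : Nat) => nset2 a2 (0 + i) (0 + j) ((fun (a b : Nat) => g (a:Int) (b:Int)) i j)) acc (List.range wn)) from by
    funext acc k
    have hf : (fun (x2 : List (List Int)) (y1 : Nat) => pvSet2 x2 (k:Int) (y1:Int) (g (k:Int) (y1:Int)))
        = (fun (a2 : List (List Int)) (j : Nat) => nset2 a2 (0 + k) (0 + j) ((fun (a b : Nat) => g (a:Int) (b:Int)) k j)) := by
      funext a2 l
      have e1 : ((k:Int)).toNat = 0 + k := by omega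
      have e2' : ((l:Int)).toNat = 0 + l := by omega
      simp [pvSet2, nset2, e1, e2']
    rw [hf]]
  rw [fill2 0 0 (fun a b => g (a:Int) (b:Int)) wn wn hn (by omega) hn (by omega)]
  apply List.map_congr_left; intro r hr
  apply List.map_congr_left; intro c hc
  rw [if_pos ⟨Nat.zero_le _, by simpa using List.mem_range.mp hr, Nat.zero_le _, by simpa using List.mem_range.mp hc⟩]
  simp

lemma main_eq (pa : List (List Int)) (w h : Int) :
    computeMedian5x3ZeroPadding pa w h = computeMedian5x3ZeroPadding_alt pa w h := by
  by_cases hh : h ≤ 0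
  · simp [computeMedian5x3ZeroPadding, computeMedian5x3ZeroPadding_alt,
      PySem.List.pyRange_one_eq_nil hh, createInitializedGreyscalePixelArray]
  · by_cases hw : w ≤ 0
    · simp [computeMedian5x3ZeroPadding, computeMedian5x3ZeroPadding_alt,
        PySem.List.pyRange_one_eq_nil hw, createInitializedGreyscalePixelArray]
      exact Or.inr hw
    obtain ⟨hn, rfl⟩ : ∃ n : Nat, h = (n : Int) := ⟨h.toNat, by omega⟩
    obtain ⟨wn, rfl⟩ : ∃ n : Nat, w = (n : Int) := ⟨w.toNat, by omega⟩
    simp only [computeMedian5x3ZeroPadding, computeMedian5x3ZeroPadding_alt]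
    rw [hpad pa hn wn, hinit wn hn]
    rw [PySem.List.pyRange_zero_natCast hn]
    simp only [PySem.List.pyRange_zero_natCast, List.foldl_map]
    refine Eq.trans (stage2 (fun i j => pvMedA ((List.range (hn + 2)).map (fun r => (List.range (wn + 4)).map (fun c =>
        if 1 ≤ r ∧ r < 1 + hn ∧ 2 ≤ c ∧ c < 2 + wn then pvGet2 pa ((r - 1 : Nat) : Int) ((c - 2 : Nat) : Int) else 0))) i j) hn wn) ?_
    simp only [PySem.List.foldl_append_singleton_eq_map, List.nil_append]
    apply List.map_congr_left; intro k hk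
    apply List.map_congr_left; intro l hl
    exact med_eq pa hn wn k l (List.mem_range.mp hk) (List.mem_range.mp hl)

-- ===== VERDICT (by name: the statement is the Claim_ definition above) =====
theorem computeMedian5x3ZeroPadding_spec : Claim_equal_computeMedian5x3ZeroPadding := by
  intro pixel_array image_width image_height _ _
  unfold Spec_computeMedian5x3ZeroPadding
  exact main_eq pixel_array image_width image_height
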